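-- pv_equiv track=rewrite | github.com/iswanulumam/cp-alta | 15-sepulsa-test/5-maximum-difference/solution.py | maxDifference3
-- ===== SOURCE A (Python) =====
-- def maxDifference3(a):
--   max_diff = -1
--
--   sub_a = []
--   for item_a in a:
--     current_val = item_a
--     sub_a.append(item_a)
--     for item_sub_a in sub_a:
--       if current_val > item_sub_a:
--         diff_val = current_val - item_sub_a
--         if diff_val > max_diff:
--           max_diff = diff_val
--   return max_diff
-- ===== SOURCE B (Python) =====
-- def maxDifference3(a):
--   max_diff = -1
--   mn = None
--   for x in a:
--     if mn is not None and x > mn: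
--       d = x - mn
--       if d > max_diff:
--         max_diff = d
--     if mn is None or x < mn:
--       mn = x
--   return max_diff
-- ===== Notes on version B (the rewrite author's own statement) =====
-- stated objective: faster
-- what changed: Replaced the quadratic rescan of the growing prefix list with a single pass that keeps only the running minimum and updates the maximum difference against it.
import Mathlib
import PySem

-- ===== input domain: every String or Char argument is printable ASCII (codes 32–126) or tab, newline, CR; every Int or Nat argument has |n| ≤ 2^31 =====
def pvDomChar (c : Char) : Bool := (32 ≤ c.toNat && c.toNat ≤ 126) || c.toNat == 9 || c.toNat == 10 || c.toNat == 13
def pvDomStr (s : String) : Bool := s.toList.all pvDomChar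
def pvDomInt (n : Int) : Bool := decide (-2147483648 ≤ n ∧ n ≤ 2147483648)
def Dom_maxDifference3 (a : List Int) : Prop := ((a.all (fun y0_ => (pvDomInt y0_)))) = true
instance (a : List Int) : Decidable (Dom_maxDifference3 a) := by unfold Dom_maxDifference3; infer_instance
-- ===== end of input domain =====

-- B replaces A's quadratic rescan of the growing prefix with one pass over a running minimum (objective: faster).

-- ===== PORT A =====
-- inner loop: for item_sub_a in sub_a: …
def maxDifference3_inner (c : Int) (md : Int) (sub : List Int) : Int :=
  sub.foldl (fun m x => if c > x then (if c - x > m then c - x else m) else m) md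

def maxDifference3 (a : List Int) : Int :=
  (a.foldl (fun (s : Int × List Int) x =>
      let sub := s.2 ++ [x]
      (maxDifference3_inner x s.1 sub, sub)) (-1, ([] : List Int))).1

-- ===== PORT B =====
def maxDifference3_alt (a : List Int) : Int :=
  (a.foldl (fun (s : Option Int × Int) x =>
      let md := match s.1 with
        | none => s.2
        | some mn => if x > mn then (if x - mn > s.2 then x - mn else s.2) else s.2
      let mn' := match s.1 with
        | none => some x
        | some mn => if x < mn then some x else some mn
      (mn', md)) ((none : Option Int), -1)).2

-- ===== PRECONDITION & SPEC =====
def Spec_maxDifference3 (a : List Int) (out : Int) : Prop := out = maxDifference3_alt a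
instance (a : List Int) (out : Int) : Decidable (Spec_maxDifference3 a out) := by unfold Spec_maxDifference3; infer_instance

-- ===== CLAIM (what is proved, stated in full; the proofs are below) =====
def Claim_equal_maxDifference3 : Prop := ∀ (a : List Int), Dom_maxDifference3 a → Spec_maxDifference3 a (maxDifference3 a)

-- ===== LEMMAS AND PROOFS =====

-- structural minimum of a list (proof helper)
def minL : List Int → Option Int
  | [] => none
  | x :: xs => some (match minL xs with | none => x | some m => if x ≤ m then x else m)

theorem minL_append_singleton (s : List Int) (x : Int) :
    minL (s ++ [x]) = some (match minL s with | none => x | some m => if m ≤ x then m else x) := by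
  induction s with
  | nil => simp [minL]
  | cons y ys ih =>
      simp only [List.cons_append, minL, ih]
      cases h : minL ys <;> simp only [minL, h] <;> split_ifs <;> simp_all <;> omega

-- the inner loop computes: bump md by (c - min sub) when c exceeds the minimum of sub
theorem inner_eq (s : List Int) (c : Int) : ∀ md : Int,
    maxDifference3_inner c md s =
      match minL s with
      | none => md
      | some mn => if c > mn then (if c - mn > md then c - mn else md) else md := by
  induction s with
  | nil => intro md; simp [maxDifference3_inner, minL]
  | cons x xs ih =>
      intro md
      simp only [maxDifference3_inner, List.foldl_cons] at *
      rw [ih]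
      cases h : minL xs <;> simp only [minL, h] <;> split_ifs <;> omega

-- main invariant: with mn = minL sub, A's remaining fold and B's remaining fold agree on max_diff
theorem outer_eq (l : List Int) : ∀ (sub : List Int) (md : Int),
    (l.foldl (fun (s : Int × List Int) x =>
        let sub := s.2 ++ [x]
        (maxDifference3_inner x s.1 sub, sub)) (md, sub)).1 =
    (l.foldl (fun (s : Option Int × Int) x =>
        let md := match s.1 with
          | none => s.2
          | some mn => if x > mn then (if x - mn > s.2 then x - mn else s.2) else s.2
        let mn' := match s.1 with
          | none => some x
          | some mn => if x < mn then some x else some mn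
        (mn', md)) (minL sub, md)).2 := by
  induction l with
  | nil => intro sub md; simp
  | cons x xs ih =>
      intro sub md
      simp only [List.foldl_cons]
      rw [inner_eq, minL_append_singleton]
      have h2 : minL (sub ++ [x]) = some (match minL sub with | none => x | some m => if m ≤ x then m else x) :=
        minL_append_singleton sub x
      rw [← h2, ih (sub ++ [x])]
      rw [h2]
      cases h : minL sub with
      | none =>
          simp only []
          congr 1 <;> simp
      | some m =>
          simp only []
          have : (if x > (if m ≤ x then m else x) then (if x - (if m ≤ x then m else x) > md then x - (if m ≤ x then m else x) else md) else md)
               = (if x > m then (if x - m > md then x - m else md) else md) := by split_ifs <;> omega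
          rw [this]
          have : (some (if m ≤ x then m else x) : Option Int) = (if x < m then some x else some m) := by
            split_ifs <;> simp <;> omega
          rw [this]
-- ===== VERDICT (by name: the statement is the Claim_ definition above) =====
theorem maxDifference3_spec : Claim_equal_maxDifference3 := by
  intro a _
  unfold Spec_maxDifference3 maxDifference3 maxDifference3_alt
  exact outer_eq a [] (-1)
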